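-- pv_equiv track=rewrite | github.com/mklug/project_euler | euler/38.py | gen_con_products
-- ===== SOURCE A (Python) =====
-- def is_pan_digital(n):
--     s = str(n)
--     if '0' in s:
--         return False
--     return len(s) == 9 and len(set(s)) == 9
--
-- def gen_con_products(n):
--
--     current_val = int(str(n) + str(2*n))
--     current_mult = 3
--
--     while len(str(current_val)) < 10:
--         if is_pan_digital(current_val):
--             yield current_val
--         current_val = int(str(current_val) + str(n * current_mult))
--         current_mult += 1
-- ===== SOURCE B (Python) =====
-- def gen_con_products(n):
--     # Recursive decomposition: build the result list back-to-front from the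
--     # recursion's return value; pandigital test by sorting the digit string.
--     def chain(cur, mult):
--         if len(str(cur)) >= 10:
--             return []
--         rest = chain(int(str(cur) + str(n * mult)), mult + 1)
--         if sorted(str(cur)) == list('123456789'):
--             rest.insert(0, cur)
--         return rest
--     yield from chain(int(str(n) + str(2 * n)), 3)
-- ===== Notes on version B (the rewrite author's own statement) =====
-- stated objective: alternative
-- what changed: B replaces A's while-loop generator that yields forward with a recursive helper that assembles the result list back-to-front from its return value, and replaces the zero/set-cardinality pandigital test with a sort-and-compare against list('123456789').
-- outside the precondition, e.g. on gen_con_products(-3): A raises ValueError, B raises ValueError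
import Mathlib
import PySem

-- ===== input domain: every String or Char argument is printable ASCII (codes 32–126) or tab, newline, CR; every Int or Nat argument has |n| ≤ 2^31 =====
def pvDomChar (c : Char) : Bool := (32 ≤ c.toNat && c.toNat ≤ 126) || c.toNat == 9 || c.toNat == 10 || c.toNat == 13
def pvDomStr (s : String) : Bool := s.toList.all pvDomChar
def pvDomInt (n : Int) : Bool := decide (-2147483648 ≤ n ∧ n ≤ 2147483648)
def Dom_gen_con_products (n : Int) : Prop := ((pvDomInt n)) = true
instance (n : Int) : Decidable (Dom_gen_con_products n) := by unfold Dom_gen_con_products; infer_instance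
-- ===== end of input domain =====

-- B replaces A's forward-yielding while loop by a recursive helper that assembles the
-- result list back-to-front from its return value, and tests pandigitality by sorting
-- the digit string and comparing with list('123456789'); objective: alternative.

-- ===== PORT A =====
def pv_is_pan_digital (v : Int) : Bool :=
  let s := PySem.Int.toChars v
  if s.contains '0' then false
  else decide (PySem.List.len s = 9) && decide (PySem.Set.len (PySem.Set.ofList s) = 9)

-- fuel makes the while loop total; inside Pre_ (1 ≤ n) the concatenation gains at
-- least one digit per iteration, so 100 iterations are never reached
def pvA_loop (n : Int) : Nat → Int → Int → List Int
  | 0, _, _ => []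
  | fuel+1, cv, mult =>
    if PySem.List.len (PySem.Int.toChars cv) < 10 then
      let ys := if pv_is_pan_digital cv then [cv] else []
      match PySem.Int.ofChars? (PySem.Int.toChars cv ++ PySem.Int.toChars (n * mult)) with
      | some cv' => ys ++ pvA_loop n fuel cv' (mult + 1)
      | none => ys   -- int() raises ValueError here; happens only outside Pre_
    else []

def gen_con_products (n : Int) : List Int :=
  match PySem.Int.ofChars? (PySem.Int.toChars n ++ PySem.Int.toChars (2 * n)) with
  | some cv => pvA_loop n 100 cv 3
  | none => []   -- int() raises ValueError here; happens only outside Pre_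

-- ===== PORT B =====
-- recursive helper 'chain'; fuel makes the recursion total (cf. pvA_loop)
def pvB_chain (n : Int) : Nat → Int → Int → List Int
  | 0, _, _ => []
  | fuel+1, cur, mult =>
    if 10 ≤ PySem.List.len (PySem.Int.toChars cur) then []
    else
      let rest :=
        match PySem.Int.ofChars? (PySem.Int.toChars cur ++ PySem.Int.toChars (n * mult)) with
        | some cur' => pvB_chain n fuel cur' (mult + 1)
        | none => []   -- int() raises ValueError here; happens only outside Pre_
      if PySem.List.sorted (PySem.Int.toChars cur) (fun c => c) false
           = ['1','2','3','4','5','6','7','8','9'] then cur :: rest else rest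

def gen_con_products_alt (n : Int) : List Int :=
  match PySem.Int.ofChars? (PySem.Int.toChars n ++ PySem.Int.toChars (2 * n)) with
  | some cur => pvB_chain n 100 cur 3
  | none => []   -- int() raises ValueError here; happens only outside Pre_

-- ===== PRECONDITION & SPEC =====
-- Pre_ excludes n ≤ 0: for n < 0 the Python A raises ValueError on int(str(n)+str(2*n)),
-- and for n = 0 the while loop never terminates.
def Pre_gen_con_products (n : Int) : Prop := 1 ≤ n
instance (n : Int) : Decidable (Pre_gen_con_products n) := by unfold Pre_gen_con_products; infer_instance
def pvWitness_gen_con_products : Int := (192)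

def Spec_gen_con_products (n : Int) (out : List Int) : Prop := out = gen_con_products_alt n
instance (n : Int) (out : List Int) : Decidable (Spec_gen_con_products n out) := by unfold Spec_gen_con_products; infer_instance

-- ===== CLAIM (what is proved, stated in full; the proofs are below) =====
def Claim_equal_gen_con_products : Prop := ∀ (n : Int), Dom_gen_con_products n → Pre_gen_con_products n → Spec_gen_con_products n (gen_con_products n)

-- ===== LEMMAS AND PROOFS =====

lemma pv_digitChar_isDigit (n : Nat) (h : n < 10) : (Nat.digitChar n).isDigit = true := by
  interval_cases n <;> decide

lemma pv_toDigitsCore_digits (fuel : Nat) : ∀ (n : Nat) (ds : List Char),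
    (∀ c ∈ ds, c.isDigit = true) → ∀ c ∈ Nat.toDigitsCore 10 fuel n ds, c.isDigit = true := by
  induction fuel with
  | zero => intro n ds h c hc; exact h c hc
  | succ fuel ih =>
    intro n ds h c hc
    rw [Nat.toDigitsCore] at hc
    have hpush : ∀ c ∈ (n % 10).digitChar :: ds, c.isDigit = true := by
      intro c hc
      rcases List.mem_cons.mp hc with h1 | h2
      · subst h1; exact pv_digitChar_isDigit _ (Nat.mod_lt _ (by omega))
      · exact h c h2
    by_cases hz : n / 10 = 0
    · simp only [hz] at hc
      exact hpush c hc
    · rw [if_neg hz] at hc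
      exact ih _ _ hpush c hc

lemma pv_toDigitsCore_ne_nil (fuel : Nat) : ∀ (n : Nat) (ds : List Char),
    0 < fuel → Nat.toDigitsCore 10 fuel n ds ≠ [] := by
  induction fuel with
  | zero => intro n ds h; omega
  | succ fuel ih =>
    intro n ds _
    rw [Nat.toDigitsCore]
    by_cases hz : n / 10 = 0
    · simp [hz]
    · rw [if_neg hz]
      cases fuel with
      | zero => rw [Nat.toDigitsCore]; simp
      | succ f => exact ih _ _ (by omega)

lemma pv_toChars_digits (m : Int) (hm : 0 ≤ m) :
    ∀ c ∈ PySem.Int.toChars m, c.isDigit = true := by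
  unfold PySem.Int.toChars
  rw [if_neg (by omega)]
  exact pv_toDigitsCore_digits _ _ _ (by simp)

lemma pv_toChars_ne_nil (m : Int) (hm : 0 ≤ m) : PySem.Int.toChars m ≠ [] := by
  unfold PySem.Int.toChars
  rw [if_neg (by omega)]
  exact pv_toDigitsCore_ne_nil _ _ _ (by omega)

lemma pv_digit_not_space (c : Char) (h : c.isDigit = true) : PySem.Int.isIntSpace c = false := by
  simp [Char.isDigit, UInt32.le_iff_toNat_le] at h
  simp [PySem.Int.isIntSpace, Char.ext_iff, UInt32.ext_iff]
  omega

lemma pv_digit_mem (c : Char) (h : c.isDigit = true) (h0 : c ≠ '0') :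
    c ∈ ['1','2','3','4','5','6','7','8','9'] := by
  simp [Char.isDigit, UInt32.le_iff_toNat_le] at h
  rw [Ne, Char.ext_iff, UInt32.ext_iff] at h0
  simp only [List.mem_cons, List.not_mem_nil, or_false, Char.ext_iff, UInt32.ext_iff]
  simp only [show ('0').val.toNat = 48 from rfl, show ('1').val.toNat = 49 from rfl,
    show ('2').val.toNat = 50 from rfl, show ('3').val.toNat = 51 from rfl,
    show ('4').val.toNat = 52 from rfl, show ('5').val.toNat = 53 from rfl,
    show ('6').val.toNat = 54 from rfl, show ('7').val.toNat = 55 from rfl,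
    show ('8').val.toNat = 56 from rfl, show ('9').val.toNat = 57 from rfl,
    show c.toNat = c.val.toNat from rfl] at h h0 ⊢
  omega

lemma pv_dropWhile_self {p : Char → Bool} (l : List Char) (h : ∀ c ∈ l, p c = false) :
    List.dropWhile p l = l := by
  cases l with
  | nil => rfl
  | cons c t => rw [List.dropWhile_cons_of_neg (by simp [h c (by simp)])]

lemma pv_opt_nonneg (X : Option Nat) (v : Int)
    (h : Option.map (fun n => n) (do let a ← X; pure ((a : Int))) = some v) : 0 ≤ v := by
  cases X with
  | none => simp at h
  | some a => simp at h; omega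

-- result of parsing a concatenation of two nonnegative str()s is nonnegative
lemma pv_parse_nonneg (a b v : Int) (ha : 0 ≤ a) (hb : 0 ≤ b)
    (h : PySem.Int.ofChars? (PySem.Int.toChars a ++ PySem.Int.toChars b) = some v) : 0 ≤ v := by
  set l := PySem.Int.toChars a ++ PySem.Int.toChars b with hl
  have hdig : ∀ c ∈ l, c.isDigit = true := by
    intro c hc
    rcases List.mem_append.mp hc with h1 | h2
    · exact pv_toChars_digits a ha c h1
    · exact pv_toChars_digits b hb c h2
  have hne : l ≠ [] := by
    intro he
    exact pv_toChars_ne_nil a ha (List.append_eq_nil_iff.mp he).1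
  have hsp : ∀ c ∈ l, PySem.Int.isIntSpace c = false :=
    fun c hc => pv_digit_not_space c (hdig c hc)
  rw [PySem.Int.ofChars?] at h
  rw [pv_dropWhile_self l hsp,
    pv_dropWhile_self l.reverse (fun c hc => hsp c (List.mem_reverse.mp hc)),
    List.reverse_reverse] at h
  obtain ⟨c, t, hct⟩ := List.exists_cons_of_ne_nil hne
  have hc : c.isDigit = true := hdig c (by rw [hct]; simp)
  rw [hct] at h
  split at h
  case _ ds heq =>
    injection heq with h1 _; rw [h1] at hc; exact absurd hc (by decide)
  case _ ds heq =>
    injection heq with h1 _; rw [h1] at hc; exact absurd hc (by decide)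
  case _ => exact pv_opt_nonneg _ _ h

lemma pv_nodup_of_card (s : List Char) (h : s.toFinset.card = s.length) : s.Nodup := by
  rw [List.card_toFinset] at h
  rw [← List.dedup_eq_self]
  exact (List.dedup_sublist s).eq_of_length h

-- the two pandigital tests agree on digit-only strings
lemma pv_pan_core (s : List Char) (hdig : ∀ c ∈ s, c.isDigit = true) :
    (if s.contains '0' then false
     else decide (PySem.List.len s = 9) && decide (PySem.Set.len (PySem.Set.ofList s) = 9))
    = decide (PySem.List.sorted s (fun c => c) false = ['1','2','3','4','5','6','7','8','9']) := by
  have hofl_nodup := PySem.Set.nodup_ofList s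
  have hofl_fin : (PySem.Set.ofList s).toFinset = s.toFinset := by
    ext c; simp [List.mem_toFinset, PySem.Set.mem_ofList]
  have hofl_len : (PySem.Set.ofList s).length = s.toFinset.card := by
    rw [← hofl_fin]; exact (List.toFinset_card_of_nodup hofl_nodup).symm
  by_cases h0 : '0' ∈ s
  · rw [if_pos (List.contains_iff_mem.mpr h0)]
    have : ¬ (PySem.List.sorted s (fun c => c) false = ['1','2','3','4','5','6','7','8','9']) := by
      intro hs
      have hperm : List.Perm ['1','2','3','4','5','6','7','8','9'] s := by
        rw [← hs]; exact PySem.List.sorted_perm s (fun c => c) false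
      have : '0' ∈ (['1','2','3','4','5','6','7','8','9'] : List Char) := hperm.mem_iff.mpr h0
      simp at this
    simp [this]
  · rw [if_neg (fun hc => h0 (List.contains_iff_mem.mp hc))]
    have hand : ∀ (p q : Prop) [Decidable p] [Decidable q] (r : Prop) [Decidable r],
        (p ∧ q ↔ r) → (decide p && decide q) = decide r := by
      intro p q _ _ r _ hiff
      by_cases hp : p <;> by_cases hq : q <;>
        simp [hp, hq, (by tauto : r ↔ (p ∧ q))]
    apply hand
    constructor
    · rintro ⟨hP, hQ⟩
      have hlen : s.length = 9 := by
        unfold PySem.List.len at hP; exact_mod_cast hP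
      have hcard : s.toFinset.card = 9 := by
        have h9 : (PySem.Set.ofList s).length = 9 := by
          unfold PySem.Set.len at hQ; exact_mod_cast hQ
        omega
      have hnd : s.Nodup := pv_nodup_of_card s (by omega)
      have hsub : s.toFinset ⊆ (['1','2','3','4','5','6','7','8','9'] : List Char).toFinset := by
        intro c hc
        have hcs := List.mem_toFinset.mp hc
        exact List.mem_toFinset.mpr (pv_digit_mem c (hdig c hcs) (fun he => h0 (he ▸ hcs)))
      have hfin : s.toFinset = (['1','2','3','4','5','6','7','8','9'] : List Char).toFinset := by
        apply Finset.eq_of_subset_of_card_le hsub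
        rw [hcard]
        decide
      have hperm : List.Perm ['1','2','3','4','5','6','7','8','9'] s :=
        (List.perm_of_nodup_nodup_toFinset_eq hnd (by decide) hfin).symm
      exact PySem.List.sorted_eq_of_perm_of_pairwise_lt s _ _ hperm (by decide)
    · intro hR
      have hperm : List.Perm ['1','2','3','4','5','6','7','8','9'] s := by
        rw [← hR]; exact PySem.List.sorted_perm s (fun c => c) false
      have hlen : s.length = 9 := by
        have := hperm.length_eq; simpa using this.symm
      have hnd : s.Nodup := hperm.nodup_iff.mp (by decide)
      constructor
      · unfold PySem.List.len; exact_mod_cast hlen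
      · unfold PySem.Set.len
        rw [hofl_len, List.toFinset_card_of_nodup hnd, hlen]
        rfl

-- the two pandigital tests agree on nonnegative values (digit-only strings)
lemma pv_pan_eq (v : Int) (hv : 0 ≤ v) :
    pv_is_pan_digital v
      = decide (PySem.List.sorted (PySem.Int.toChars v) (fun c => c) false
          = ['1','2','3','4','5','6','7','8','9']) := by
  unfold pv_is_pan_digital
  exact pv_pan_core (PySem.Int.toChars v) (pv_toChars_digits v hv)

lemma pv_loop_eq (fuel : Nat) : ∀ (n cv mult : Int), 1 ≤ n → 0 ≤ cv → 0 ≤ mult →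
    pvA_loop n fuel cv mult = pvB_chain n fuel cv mult := by
  induction fuel with
  | zero => intro n cv mult _ _ _; rfl
  | succ fuel ih =>
    intro n cv mult hn hcv hmult
    have hpan := pv_pan_eq cv hcv
    unfold pvA_loop pvB_chain
    by_cases hlen : PySem.List.len (PySem.Int.toChars cv) < 10
    · rw [if_pos hlen, if_neg (not_le.mpr hlen)]
      cases h : PySem.Int.ofChars? (PySem.Int.toChars cv ++ PySem.Int.toChars (n * mult)) with
      | some cv' =>
        have hcv' : 0 ≤ cv' := pv_parse_nonneg cv (n * mult) cv' hcv (mul_nonneg (by omega) hmult) h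
        simp only [ih n cv' (mult + 1) hn hcv' (by omega), hpan]
        by_cases hp : PySem.List.sorted (PySem.Int.toChars cv) (fun c => c) false
            = ['1','2','3','4','5','6','7','8','9']
        · simp [hp]
        · simp [hp]
      | none =>
        simp only [hpan]
        by_cases hp : PySem.List.sorted (PySem.Int.toChars cv) (fun c => c) false
            = ['1','2','3','4','5','6','7','8','9']
        · simp [hp]
        · simp [hp]
    · rw [if_neg hlen, if_pos (not_lt.mp hlen)]

-- ===== VERDICT (by name: the statement is the Claim_ definition above) =====
theorem gen_con_products_spec : Claim_equal_gen_con_products := by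
  intro n _ hn
  have hn' : (1:Int) ≤ n := hn
  unfold Spec_gen_con_products gen_con_products gen_con_products_alt
  cases h : PySem.Int.ofChars? (PySem.Int.toChars n ++ PySem.Int.toChars (2 * n)) with
  | some cv =>
    exact pv_loop_eq 100 n cv 3 hn' (pv_parse_nonneg n (2 * n) cv (by omega) (by omega) h) (by omega)
  | none => rfl
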